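-- pv_equiv track=rewrite | github.com/philipzhou2009/coding | python/03xx/395/solution01.py | func
-- ===== SOURCE A (Python) =====
-- logger = print if False else lambda *arg: None
--
-- def isValid(theDict: dict, k: int):
--
--     for x, y in theDict.items():
--         if y < k:
--             return False
--
--     return True
--
-- def func(s: str, k: int):
--     logger("input str=", s)
--     theDict = {}
--     counter = 0
--     nEnd = -1
--     theLen = 0
--     for e in s:
--         counter += 1
--         # logger("e=", e)
--
--         if e in theDict:
--             theDict[e] += 1
--         else:
--             theDict[e] = 1
--
--         logger("theDict=", theDict)
--         valid = isValid(theDict, k)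
--
--         if valid and counter > nEnd:
--             theLen = counter
--
--     return theLen
-- ===== SOURCE B (Python) =====
-- def func(s: str, k: int):
--     counts = {}
--     deficient = 0  # number of distinct chars seen so far whose count is < k
--     n = 0
--     ans = 0
--     for e in s:
--         n += 1
--         c = counts.get(e, 0)
--         counts[e] = c + 1
--         if c == 0:
--             if 1 < k:
--                 deficient += 1
--         elif c + 1 == k:
--             deficient -= 1
--         if deficient == 0:
--             ans = n
--     return ans
-- ===== Notes on version B (the rewrite author's own statement) =====
-- stated objective: faster
-- what changed: Replaces the per-character full rescan of the whole frequency dict (isValid) by an O(1) running counter of distinct characters whose frequency is still below k; validity is just counter == 0.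
import Mathlib
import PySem

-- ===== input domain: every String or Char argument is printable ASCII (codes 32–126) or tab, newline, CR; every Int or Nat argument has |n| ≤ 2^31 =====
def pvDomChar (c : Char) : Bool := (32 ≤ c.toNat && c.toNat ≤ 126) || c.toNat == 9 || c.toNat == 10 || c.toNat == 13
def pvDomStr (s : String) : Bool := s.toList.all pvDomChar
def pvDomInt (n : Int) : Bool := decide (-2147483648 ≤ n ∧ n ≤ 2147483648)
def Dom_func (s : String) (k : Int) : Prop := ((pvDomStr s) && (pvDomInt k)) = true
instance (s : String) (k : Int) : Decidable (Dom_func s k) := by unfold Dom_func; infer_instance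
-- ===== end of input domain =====

-- B replaces A's per-character full rescan of the frequency dict (isValid) by a running
-- count of distinct characters whose frequency is < k; objective: faster.


-- ===== PORT A =====
-- isValid(theDict, k): loop over items, False as soon as some value < k
def isValidA (d : PySem.Dict Char Int) (k : Int) : Bool :=
  d.items.all (fun p => !(decide (p.2 < k)))

-- one iteration of A's for-loop; state = (theDict, counter, nEnd, theLen)
def stepA (k : Int) (st : PySem.Dict Char Int × Int × Int × Int) (e : Char) :
    PySem.Dict Char Int × Int × Int × Int :=
  let d := st.1
  let counter := st.2.1 + 1
  -- 'theDict[e] += 1' is read-then-overwrite; getD is exact here since 'e in theDict'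
  let d := if d.contains e then d.insert e (d.getD e 0 + 1) else d.insert e 1
  let valid := isValidA d k
  let theLen := if valid && decide (counter > st.2.2.1) then counter else st.2.2.2
  (d, counter, st.2.2.1, theLen)

def func (s : String) (k : Int) : Int :=
  (s.toList.foldl (stepA k) (PySem.Dict.empty, 0, -1, 0)).2.2.2

-- ===== PORT B =====
-- one iteration of B's loop; state = (counts, deficient, n, ans)
def stepB (k : Int) (st : PySem.Dict Char Int × Int × Int × Int) (e : Char) :
    PySem.Dict Char Int × Int × Int × Int :=
  let counts := st.1
  let deficient := st.2.1
  let n := st.2.2.1 + 1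
  let c := counts.getD e 0
  let counts := counts.insert e (c + 1)
  let deficient :=
    if c == 0 then (if (1 : Int) < k then deficient + 1 else deficient)
    else if c + 1 == k then deficient - 1 else deficient
  let ans := if deficient == 0 then n else st.2.2.2
  (counts, deficient, n, ans)

def func_alt (s : String) (k : Int) : Int :=
  (s.toList.foldl (stepB k) (PySem.Dict.empty, 0, 0, 0)).2.2.2

-- ===== PRECONDITION & SPEC =====
def Spec_func (s : String) (k : Int) (out : Int) : Prop := out = func_alt s k
instance (s : String) (k : Int) (out : Int) : Decidable (Spec_func s k out) := by unfold Spec_func; infer_instance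

-- ===== CLAIM (what is proved, stated in full; the proofs are below) =====
def Claim_equal_func : Prop := ∀ (s : String) (k : Int), Dom_func s k → Spec_func s k (func s k)

-- ===== LEMMAS AND PROOFS =====

-- number of distinct seen chars whose count is < k (the quantity B's 'deficient' tracks)
def defCount (d : PySem.Dict Char Int) (k : Int) : Int :=
  ((d.keys.countP (fun x => decide (d.getD x 0 < k)) : Nat) : Int)

lemma getD_pos_of_contains (d : PySem.Dict Char Int) (e : Char)
    (hv : ∀ p ∈ d.items, 1 ≤ p.2) (h : d.contains e = true) : 1 ≤ d.getD e 0 := by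
  rw [PySem.Dict.contains_eq_isSome_get?] at h
  rcases Option.isSome_iff_exists.1 h with ⟨v, hov⟩
  rw [PySem.Dict.getD_of_get?_eq_some d 0 hov]
  exact hv (e, v) (PySem.Dict.mem_items_of_get?_eq_some d hov)

-- A's isValid is exactly 'defCount = 0'
lemma isValid_eq (d : PySem.Dict Char Int) (hnd : d.keys.Nodup) (k : Int) :
    isValidA d k = (defCount d k == 0) := by
  rw [isValidA, PySem.Dict.items_eq_map_keys d hnd 0, List.all_map]
  rw [Bool.eq_iff_iff]
  simp [defCount, List.countP_eq_zero]

-- countP over a Nodup list when the predicate changes only at one member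
lemma countP_update {α} [DecidableEq α] (l : List α) (e : α) (hl : l.Nodup) (he : e ∈ l)
    (p q : α → Bool) (h : ∀ x ∈ l, x ≠ e → p x = q x) :
    l.countP p + (if q e then 1 else 0) = l.countP q + (if p e then 1 else 0) := by
  have hperm : l.Perm (e :: l.erase e) := List.perm_cons_erase he
  rw [hperm.countP_eq p, hperm.countP_eq q, List.countP_cons, List.countP_cons]
  have ht : (l.erase e).countP p = (l.erase e).countP q := by
    apply List.countP_congr
    intro x hx
    have hh := (List.Nodup.mem_erase_iff hl).1 hx
    rw [h x hh.2 hh.1]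
  rw [ht]; split_ifs <;> omega

-- defCount after one counting step changes exactly as B's 'deficient' update says
lemma defCount_insert (d : PySem.Dict Char Int) (k : Int) (e : Char) (hnd : d.keys.Nodup)
    (hv : ∀ p ∈ d.items, 1 ≤ p.2) :
    defCount (d.insert e (d.getD e 0 + 1)) k =
      (if d.getD e 0 == 0 then
         (if (1 : Int) < k then defCount d k + 1 else defCount d k)
       else if d.getD e 0 + 1 == k then defCount d k - 1 else defCount d k) := by
  by_cases hc : d.contains e = true
  · have hc1 : 1 ≤ d.getD e 0 := getD_pos_of_contains d e hv hc
    have hk : (d.insert e (d.getD e 0 + 1)).keys = d.keys :=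
      PySem.Dict.keys_insert_of_contains d _ hc
    have he : e ∈ d.keys := (PySem.Dict.contains_iff_mem_keys d e).1 hc
    have key := countP_update d.keys e hnd he
        (fun x => decide ((if x = e then d.getD e 0 + 1 else d.getD x 0) < k))
        (fun x => decide (d.getD x 0 < k))
        (fun x _ hne => by simp [hne])
    unfold defCount
    rw [hk]
    simp only [PySem.Dict.getD_insert]
    simp only [beq_iff_eq] at key ⊢
    split_ifs at key ⊢ <;> simp_all <;> omega
  · have hc' : d.contains e = false := Bool.eq_false_iff.2 hc
    have hc0 : d.getD e 0 = 0 := PySem.Dict.getD_of_not_contains d 0 hc'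
    have hk : (d.insert e (d.getD e 0 + 1)).keys = d.keys ++ [e] :=
      PySem.Dict.keys_insert_of_not_contains d _ hc'
    have hnm : e ∉ d.keys := fun h => by
      rw [(PySem.Dict.contains_iff_mem_keys d e).2 h] at hc'; cases hc'
    unfold defCount
    rw [hk, List.countP_append]
    simp only [PySem.Dict.getD_insert]
    have hcong : (d.keys.countP fun x => decide ((if x = e then d.getD e 0 + 1 else d.getD x 0) < k))
        = d.keys.countP fun x => decide (d.getD x 0 < k) := by
      apply List.countP_congr
      intro x hx
      have : x ≠ e := fun hxe => hnm (hxe ▸ hx)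
      simp [this]
    rw [hcong]
    simp only [hc0, beq_iff_eq, List.countP_cons, List.countP_nil]
    norm_num
    split_ifs <;> simp_all

-- loop invariant: A's and B's folds keep the same dict, counter and answer, and
-- B's 'deficient' component is defCount of the shared dict
lemma loop_eq (k : Int) : ∀ (l : List Char) (d : PySem.Dict Char Int) (cnt len : Int),
    0 ≤ cnt → d.keys.Nodup → (∀ p ∈ d.items, 1 ≤ p.2) →
    (l.foldl (stepA k) (d, cnt, -1, len)).2.2.2
      = (l.foldl (stepB k) (d, defCount d k, cnt, len)).2.2.2 := by
  intro l
  induction l with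
  | nil => intro d cnt len _ _ _; rfl
  | cons e t ih =>
    intro d cnt len hcnt hnd hv
    rw [List.foldl_cons, List.foldl_cons]
    have hdict : (if d.contains e then d.insert e (d.getD e 0 + 1) else d.insert e 1)
        = d.insert e (d.getD e 0 + 1) := by
      by_cases hc : d.contains e = true
      · simp [hc]
      · have hc' : d.contains e = false := Bool.eq_false_iff.2 hc
        rw [PySem.Dict.getD_of_not_contains d 0 hc']
        simp [hc']
    set d' := d.insert e (d.getD e 0 + 1) with hd'
    have hnd' : d'.keys.Nodup := PySem.Dict.nodup_keys_insert d e _ hnd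
    have hv' : ∀ p ∈ d'.items, 1 ≤ p.2 := by
      intro p hp
      rcases (PySem.Dict.mem_items_insert d e _ p).1 hp with h | h
      · subst h
        by_cases hc : d.contains e = true
        · have := getD_pos_of_contains d e hv hc; simp; omega
        · have hc' : d.contains e = false := Bool.eq_false_iff.2 hc
          rw [PySem.Dict.getD_of_not_contains d 0 hc']; simp
      · exact hv p h.1
    have hval : isValidA d' k = (defCount d' k == 0) := isValid_eq d' hnd' k
    have hdef : defCount d' k =
        (if d.getD e 0 == 0 then
           (if (1 : Int) < k then defCount d k + 1 else defCount d k)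
         else if d.getD e 0 + 1 == k then defCount d k - 1 else defCount d k) :=
      defCount_insert d k e hnd hv
    have hA : stepA k (d, cnt, -1, len) e
        = (d', cnt + 1, -1, if defCount d' k == 0 then cnt + 1 else len) := by
      have h1 : decide (cnt + 1 > (-1 : Int)) = true := by simp; omega
      simp only [stepA, h1, Bool.and_true]
      rw [← hd', hdict, hval]
    have hB : stepB k (d, defCount d k, cnt, len) e
        = (d', defCount d' k, cnt + 1, if defCount d' k == 0 then cnt + 1 else len) := by
      simp only [stepB, ← hdef, ← hd']
    rw [hA, hB]
    exact ih d' (cnt + 1) _ (by omega) hnd' hv'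

-- ===== VERDICT (by name: the statement is the Claim_ definition above) =====
theorem func_spec : Claim_equal_func := by
  intro s k _
  unfold Spec_func func func_alt
  have h := loop_eq k s.toList PySem.Dict.empty 0 0 le_rfl
      PySem.Dict.nodup_keys_empty (by intro p hp; simp [PySem.Dict.empty] at hp)
  have h0 : defCount PySem.Dict.empty k = 0 := by simp [defCount, PySem.Dict.keys]
  rw [h, h0]
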